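-- pv_equiv track=rewrite | github.com/wtf-sonii/CPS109_labs | labs109.py | count_growlers
-- ===== SOURCE A (Python) =====
-- def count_growlers(animals):
--   growlers = 0
--
--   for animalIndex in range(len(animals)):
--     if (animals[animalIndex] == "cat") or (animals[animalIndex] == "dog"):  # look left
--       countCats = 0
--       countDogs = 0
--       for subAI in range(0, animalIndex):
--         if (animals[subAI] == "cat") or (animals[subAI] == "tac"):
--           countCats +=1
--         elif (animals[subAI] == "dog") or (animals[subAI] == "god"):
--           countDogs +=1
--       if (countDogs > countCats):
--         growlers += 1
--
--     elif (animals[animalIndex] == "tac") or (animals[animalIndex] == "god"): # look right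
--       countCats = 0
--       countDogs = 0
--       for subAI in range(animalIndex+1, len(animals)):
--         if (animals[subAI] == "cat") or (animals[subAI] == "tac"):
--           countCats +=1
--         elif (animals[subAI] == "dog") or (animals[subAI] == "god"):
--           countDogs +=1
--       if (countDogs > countCats):
--         growlers += 1
--
--
--   return growlers
-- ===== SOURCE B (Python) =====
-- def _val(a):
--     if a == "cat" or a == "tac":
--         return -1
--     if a == "dog" or a == "god":
--         return 1
--     return 0
--
--
-- def count_growlers(animals):
--     # One pass: 'left' is (dogs - cats) among animals before the current one;
--     # the (dogs - cats) of the animals after it is total - left - _val(current).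
--     total = sum(_val(a) for a in animals)
--     growlers = 0
--     left = 0
--     for a in animals:
--         v = _val(a)
--         if a == "cat" or a == "dog":
--             if left > 0:
--                 growlers += 1
--         elif a == "tac" or a == "god":
--             if total - left - v > 0:
--                 growlers += 1
--         left += v
--     return growlers
-- ===== Notes on version B (the rewrite author's own statement) =====
-- stated objective: alternative
-- what changed: B replaces A's per-animal rescan of the left/right sub-list by a single pass that maintains a running prefix (dogs - cats) balance and derives the suffix balance by subtraction from a precomputed total.
import Mathlib
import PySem

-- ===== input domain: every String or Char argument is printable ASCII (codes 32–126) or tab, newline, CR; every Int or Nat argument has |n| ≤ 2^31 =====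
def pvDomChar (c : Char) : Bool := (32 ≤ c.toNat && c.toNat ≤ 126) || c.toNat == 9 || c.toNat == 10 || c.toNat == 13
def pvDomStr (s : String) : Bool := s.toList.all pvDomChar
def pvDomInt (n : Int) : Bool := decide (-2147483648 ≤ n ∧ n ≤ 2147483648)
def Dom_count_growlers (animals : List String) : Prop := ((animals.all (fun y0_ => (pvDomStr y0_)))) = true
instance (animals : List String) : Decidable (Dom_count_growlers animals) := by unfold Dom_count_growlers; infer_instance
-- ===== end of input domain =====

-- B: one pass with a running prefix (dogs-cats) balance and a precomputed total, instead of A's per-animal rescan of the sub-list on the facing side.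

-- ===== PORT A =====
-- A's inner loop body (counting cats/dogs in a sub-range), state = (countCats, countDogs)
def pvCount (p : Int × Int) (a : String) : Int × Int :=
  if a == "cat" || a == "tac" then (p.1 + 1, p.2)
  else if a == "dog" || a == "god" then (p.1, p.2 + 1)
  else p

-- A's outer loop body: for each index, rescan left or right and bump growlers
def pvOuter (animals : List String) (growlers : Int) (i : Int) : Int :=
  let a := PySem.List.pyGetD animals i ""
  if a == "cat" || a == "dog" then
    let c := (PySem.List.pyRange 0 i 1).foldl
      (fun p j => pvCount p (PySem.List.pyGetD animals j "")) (0, 0)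
    if c.2 > c.1 then growlers + 1 else growlers
  else if a == "tac" || a == "god" then
    let c := (PySem.List.pyRange (i + 1) (animals.length : Int) 1).foldl
      (fun p j => pvCount p (PySem.List.pyGetD animals j "")) (0, 0)
    if c.2 > c.1 then growlers + 1 else growlers
  else growlers

def count_growlers (animals : List String) : Int :=
  (PySem.List.pyRange 0 (animals.length : Int) 1).foldl (pvOuter animals) 0

-- ===== PORT B =====
def pvVal (a : String) : Int :=
  if a == "cat" || a == "tac" then -1
  else if a == "dog" || a == "god" then 1
  else 0

-- B's loop body, state = (growlers, left = dogs-cats balance of the animals already seen)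
def pvBStep (total : Int) (p : Int × Int) (a : String) : Int × Int :=
  let v := pvVal a
  let g := if a == "cat" || a == "dog" then (if p.2 > 0 then p.1 + 1 else p.1)
           else if a == "tac" || a == "god" then
             (if total - p.2 - v > 0 then p.1 + 1 else p.1)
           else p.1
  (g, p.2 + v)

def count_growlers_alt (animals : List String) : Int :=
  let total := (animals.map pvVal).sum
  (animals.foldl (pvBStep total) (0, 0)).1

-- ===== PRECONDITION & SPEC =====
def Spec_count_growlers (animals : List String) (out : Int) : Prop := out = count_growlers_alt animals
instance (animals : List String) (out : Int) : Decidable (Spec_count_growlers animals out) := by unfold Spec_count_growlers; infer_instance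

-- ===== CLAIM (what is proved, stated in full; the proofs are below) =====
def Claim_equal_count_growlers : Prop := ∀ (animals : List String), Dom_count_growlers animals → Spec_count_growlers animals (count_growlers animals)

-- ===== LEMMAS AND PROOFS =====

-- A's cat/dog tally determines exactly the balance B tracks: dogs - cats = Σ pvVal
lemma pvCount_diff (l : List String) (p : Int × Int) :
    (l.foldl pvCount p).2 - (l.foldl pvCount p).1 = p.2 - p.1 + (l.map pvVal).sum := by
  induction l generalizing p with
  | nil => simp
  | cons a l ih =>
    simp only [List.foldl_cons, List.map_cons, List.sum_cons, ih]
    simp only [pvCount, pvVal]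
    split_ifs <;> simp <;> ring

lemma pvCount_gt (l : List String) :
    ((l.foldl pvCount (0, 0)).2 > (l.foldl pvCount (0, 0)).1) ↔ ((l.map pvVal).sum > 0) := by
  have h := pvCount_diff l (0, 0)
  omega

-- A's left rescan (range(0, i)) is a fold over the prefix
lemma pvInner_take (xs : List String) (i : Nat) (hi : i ≤ xs.length) :
    (PySem.List.pyRange 0 (i : Int) 1).foldl
      (fun p j => pvCount p (PySem.List.pyGetD xs j "")) (0, 0)
    = (xs.take i).foldl pvCount (0, 0) := by
  have hlen : ((xs.take i).length : Int) = (i : Int) := by simp [hi]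
  have hfold := PySem.List.foldl_pyRange_zero_pyGetD (xs.take i) "" pvCount ((0, 0) : Int × Int)
  simp only [PySem.List.len_eq] at hfold
  rw [hlen] at hfold
  rw [← hfold]
  apply PySem.List.foldl_congr_mem
  intro acc j hj
  rw [PySem.List.mem_pyRange_one] at hj
  have h0 : 0 ≤ j := hj.1
  have hji : j < (i : Int) := hj.2
  rw [PySem.List.pyGetD_eq_getElem xs "" h0 (by omega),
      PySem.List.pyGetD_eq_getElem (xs.take i) "" h0 (by rw [hlen]; omega)]
  congr 1
  rw [List.getElem_take]

-- A's right rescan (range(i+1, len)) is a fold over the suffix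
lemma pvInner_drop (xs : List String) (i : Nat) :
    (PySem.List.pyRange ((i : Int) + 1) (xs.length : Int) 1).foldl
      (fun p j => pvCount p (PySem.List.pyGetD xs j "")) (0, 0)
    = (xs.drop (i + 1)).foldl pvCount (0, 0) := by
  have hfold := PySem.List.foldl_pyRange_pyGetD xs "" pvCount ((0, 0) : Int × Int)
    (a := (i : Int) + 1) (by omega)
  simp only [PySem.List.len_eq] at hfold
  rw [hfold, show ((i : Int) + 1).toNat = i + 1 from by omega]

-- main induction: A's remaining outer iterations = B's fold over the remaining animals
lemma pvMain (suf : List String) : ∀ (pre : List String) (g : Int),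
    (PySem.List.pyRange (pre.length : Int) (((pre ++ suf).length : Nat) : Int) 1).foldl
      (pvOuter (pre ++ suf)) g
    = (suf.foldl (pvBStep (((pre ++ suf).map pvVal).sum)) (g, (pre.map pvVal).sum)).1 := by
  induction suf with
  | nil =>
    intro pre g
    simp [PySem.List.pyRange_one_eq_nil]
  | cons a suf ih =>
    intro pre g
    have hfull : pre ++ a :: suf = (pre ++ [a]) ++ suf := by simp
    have hlt : (pre.length : Int) < (((pre ++ a :: suf).length : Nat) : Int) := by
      simp
    rw [PySem.List.pyRange_one_cons hlt]
    simp only [List.foldl_cons]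
    -- identify the current animal
    have hget : PySem.List.pyGetD (pre ++ a :: suf) (pre.length : Int) "" = a := by
      rw [PySem.List.pyGetD_natCast]
      simp [List.getD_eq_getElem?_getD]
    -- the outer-step value equals B's step value
    have hsum : ((pre ++ a :: suf).map pvVal).sum
        = (pre.map pvVal).sum + pvVal a + (suf.map pvVal).sum := by
      simp; ring
    have hstep : pvOuter (pre ++ a :: suf) g (pre.length : Int)
        = (pvBStep (((pre ++ a :: suf).map pvVal).sum) (g, (pre.map pvVal).sum) a).1 := by
      simp only [pvOuter, pvBStep, hget]
      have htake : (pre ++ a :: suf).take pre.length = pre := by simp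
      have hdrop : (pre ++ a :: suf).drop (pre.length + 1) = suf := by
        rw [show pre.length + 1 = (pre ++ [a]).length by simp, hfull, List.drop_left]
      by_cases h1 : (a == "cat" || a == "dog") = true
      · rw [if_pos h1, if_pos h1]
        rw [pvInner_take (pre ++ a :: suf) pre.length (by simp), htake]
        exact if_congr (pvCount_gt pre) rfl rfl
      · rw [if_neg h1, if_neg h1]
        by_cases h2 : (a == "tac" || a == "god") = true
        · rw [if_pos h2, if_pos h2]
          rw [pvInner_drop (pre ++ a :: suf) pre.length, hdrop]
          have heq : ((pre ++ a :: suf).map pvVal).sum - (pre.map pvVal).sum - pvVal a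
              = (suf.map pvVal).sum := by rw [hsum]; ring
          rw [heq]
          exact if_congr (pvCount_gt suf) rfl rfl
        · rw [if_neg h2, if_neg h2]
    rw [hstep]
    -- recurse with pre' = pre ++ [a]
    have hlen' : ((pre ++ [a]).length : Int) = (pre.length : Int) + 1 := by simp
    have := ih (pre ++ [a]) (pvBStep (((pre ++ a :: suf).map pvVal).sum) (g, (pre.map pvVal).sum) a).1
    rw [hlen', ← hfull] at this
    rw [this]
    congr 1
    simp [pvBStep]

-- ===== VERDICT (by name: the statement is the Claim_ definition above) =====
theorem count_growlers_spec : Claim_equal_count_growlers := by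
  intro animals _
  unfold Spec_count_growlers count_growlers count_growlers_alt
  have := pvMain animals [] 0
  simpa using this
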